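-- pv_equiv track=rewrite | github.com/chenmx00/MEV-Arbitrage-Detector | LindenShore.py | check_balance_positive
-- ===== SOURCE A (Python) =====
-- def check_balance_positive(balance):
--     arbitrage = False
--     for _, size in balance.items():
--         if size < 0:
--             return False
--         if size > 0:
--             arbitrage = True
--     return arbitrage
-- ===== SOURCE B (Python) =====
-- def check_balance_positive(balance):
--     if not balance:
--         return False
--     vals = balance.values()
--     return min(vals) >= 0 and max(vals) > 0
-- ===== Notes on version B (the rewrite author's own statement) =====
-- stated objective: simpler
-- what changed: Replaces A's early-exit loop with a boolean flag by an empty guard plus two reductions (min/max over the values) compared against zero.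
import Mathlib
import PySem

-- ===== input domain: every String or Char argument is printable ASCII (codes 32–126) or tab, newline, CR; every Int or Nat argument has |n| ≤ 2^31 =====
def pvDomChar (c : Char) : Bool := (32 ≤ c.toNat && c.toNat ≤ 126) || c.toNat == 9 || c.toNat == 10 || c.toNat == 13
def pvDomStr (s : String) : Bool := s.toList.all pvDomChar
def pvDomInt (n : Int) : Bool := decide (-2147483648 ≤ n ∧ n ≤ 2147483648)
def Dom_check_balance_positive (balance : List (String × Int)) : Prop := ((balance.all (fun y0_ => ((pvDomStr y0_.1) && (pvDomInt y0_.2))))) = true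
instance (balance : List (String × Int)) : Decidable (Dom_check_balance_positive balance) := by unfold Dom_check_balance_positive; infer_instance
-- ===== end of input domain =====

-- B replaces A's early-exit loop with a flag by an empty guard plus min/max reductions; objective: simpler.

-- ===== PORT A =====
-- the loop with early return and the 'arbitrage' flag
def checkGoA : List (String × Int) → Bool → Bool
  | [], arb => arb
  | (_, s) :: rest, arb =>
    if s < 0 then false
    else if s > 0 then checkGoA rest true
    else checkGoA rest arb

def check_balance_positive (balance : List (String × Int)) : Bool :=
  checkGoA balance false

-- ===== PORT B =====
def check_balance_positive_alt (balance : List (String × Int)) : Bool :=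
  if balance = [] then false
  else
    match PySem.List.min? (balance.map Prod.snd) (fun x => x),
          PySem.List.max? (balance.map Prod.snd) (fun x => x) with
    | some mn, some mx => decide (0 ≤ mn) && decide (0 < mx)
    | _, _ => false

-- ===== PRECONDITION & SPEC =====
def Spec_check_balance_positive (balance : List (String × Int)) (out : Bool) : Prop := out = check_balance_positive_alt balance
instance (balance : List (String × Int)) (out : Bool) : Decidable (Spec_check_balance_positive balance out) := by unfold Spec_check_balance_positive; infer_instance

-- ===== CLAIM (what is proved, stated in full; the proofs are below) =====
def Claim_equal_check_balance_positive : Prop := ∀ (balance : List (String × Int)), Dom_check_balance_positive balance → Spec_check_balance_positive balance (check_balance_positive balance)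

-- ===== LEMMAS AND PROOFS =====

theorem checkGoA_char (l : List (String × Int)) (arb : Bool) :
    checkGoA l arb = ((l.all (fun p => decide (0 ≤ p.2))) && (arb || l.any (fun p => decide (0 < p.2)))) := by
  induction l generalizing arb with
  | nil => simp [checkGoA]
  | cons h t ih =>
    obtain ⟨k, s⟩ := h
    simp only [checkGoA]
    by_cases hs : s < 0
    · simp only [if_pos hs, List.all_cons, List.any_cons]
      have : ¬ (0 ≤ s) := by omega
      simp [this]
    · by_cases hp : s > 0
      · simp only [if_neg hs, if_pos hp, ih, List.all_cons, List.any_cons]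
        have h0 : (0 ≤ s) := by omega
        simp [h0, hp]
      · simp only [if_neg hs, if_neg hp, ih, List.all_cons, List.any_cons]
        have h0 : (0 ≤ s) := by omega
        have h1 : ¬ (0 < s) := by omega
        simp [h0, h1]

theorem foldl_min_nonneg (vs : List Int) (v : Int) :
    (0 ≤ vs.foldl min v) ↔ (0 ≤ v ∧ ∀ x ∈ vs, 0 ≤ x) := by
  induction vs generalizing v with
  | nil => simp
  | cons h t ih =>
    simp only [List.foldl_cons, ih, List.mem_cons]
    constructor
    · rintro ⟨h1, h2⟩
      refine ⟨?_, ?_⟩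
      · exact le_trans h1 (min_le_left _ _)
      · rintro x (rfl | hx)
        · exact le_trans h1 (min_le_right _ _)
        · exact h2 x hx
    · rintro ⟨h1, h2⟩
      exact ⟨le_min h1 (h2 h (Or.inl rfl)), fun x hx => h2 x (Or.inr hx)⟩

theorem foldl_max_pos (vs : List Int) (v : Int) :
    (0 < vs.foldl max v) ↔ (0 < v ∨ ∃ x ∈ vs, 0 < x) := by
  induction vs generalizing v with
  | nil => simp
  | cons h t ih =>
    simp only [List.foldl_cons, ih, List.mem_cons]
    constructor
    · rintro (h1 | ⟨x, hx, h2⟩)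
      · rcases lt_max_iff.mp h1 with h1 | h1
        · exact Or.inl h1
        · exact Or.inr ⟨h, Or.inl rfl, h1⟩
      · exact Or.inr ⟨x, Or.inr hx, h2⟩
    · rintro (h1 | ⟨x, rfl | hx, h2⟩)
      · exact Or.inl (lt_max_iff.mpr (Or.inl h1))
      · exact Or.inl (lt_max_iff.mpr (Or.inr h2))
      · exact Or.inr ⟨x, hx, h2⟩

-- ===== VERDICT (by name: the statement is the Claim_ definition above) =====
theorem check_balance_positive_spec : Claim_equal_check_balance_positive := by
  intro balance _
  unfold Spec_check_balance_positive check_balance_positive check_balance_positive_alt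
  rw [checkGoA_char]
  cases balance with
  | nil => simp
  | cons h t =>
    simp only [List.map_cons, PySem.List.min?_id_cons, PySem.List.max?_id_cons]
    simp only [if_neg (List.cons_ne_nil h t)]
    rw [Bool.eq_iff_iff]
    simp only [Bool.and_eq_true, Bool.false_or, List.all_cons, List.any_cons,
      Bool.or_eq_true, List.all_eq_true, List.any_eq_true, decide_eq_true_eq,
      foldl_min_nonneg, foldl_max_pos, List.mem_map]
    constructor
    · rintro ⟨⟨hh, hall⟩, hany⟩
      refine ⟨⟨hh, ?_⟩, ?_⟩
      · rintro x ⟨p, hp, rfl⟩; exact hall p hp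
      · rcases hany with hh0 | ⟨p, hp, hp0⟩
        · exact Or.inl hh0
        · exact Or.inr ⟨p.2, ⟨p, hp, rfl⟩, hp0⟩
    · rintro ⟨⟨hh, hall⟩, hmax⟩
      refine ⟨⟨hh, fun p hp => hall p.2 ⟨p, hp, rfl⟩⟩, ?_⟩
      rcases hmax with hh0 | ⟨x, ⟨p, hp, rfl⟩, hx⟩
      · exact Or.inl hh0
      · exact Or.inr ⟨p, hp, hx⟩
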